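-- pv_equiv track=rewrite | github.com/jqyang3108/Python-Learning | Prelab05/text_utils.py | get_word_to_frequency_ordered_by_first_idx
-- ===== SOURCE A (Python) =====
-- from collections import namedtuple,OrderedDict
--
-- def get_word_to_frequency_ordered_by_first_idx(words):
--     a = []
--     dic = OrderedDict()
--     for index, word in enumerate(words):
--         if word not in a:
--             a.append(word)
--             dic[word] = 0
--         dic[word] += 1
--     return dic
-- ===== SOURCE B (Python) =====
-- from collections import OrderedDict, Counter
--
-- def get_word_to_frequency_ordered_by_first_idx(words):
--     freq = Counter(words)
--     first = {}
--     for i, w in enumerate(words):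
--         if w not in first:
--             first[w] = i
--     return OrderedDict(sorted(freq.items(), key=lambda kv: first[kv[0]]))
-- ===== Notes on version B (the rewrite author's own statement) =====
-- stated objective: faster
-- what changed: Replaces the quadratic seen-list membership loop with a Counter plus a first-occurrence index table, then orders the counted items by a stable sort on first index instead of order-preserving insertion.
import Mathlib
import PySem

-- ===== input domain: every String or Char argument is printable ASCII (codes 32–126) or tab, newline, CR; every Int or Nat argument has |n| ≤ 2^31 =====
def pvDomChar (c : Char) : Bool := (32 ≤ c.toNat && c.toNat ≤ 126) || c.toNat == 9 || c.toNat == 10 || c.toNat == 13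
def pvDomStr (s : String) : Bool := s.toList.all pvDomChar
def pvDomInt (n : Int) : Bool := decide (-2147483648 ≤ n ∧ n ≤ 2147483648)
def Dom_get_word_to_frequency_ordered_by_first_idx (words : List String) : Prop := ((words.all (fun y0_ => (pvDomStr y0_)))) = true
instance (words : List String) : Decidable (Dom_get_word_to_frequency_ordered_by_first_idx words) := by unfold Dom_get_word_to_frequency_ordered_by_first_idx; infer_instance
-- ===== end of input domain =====

-- B replaces A's quadratic seen-list membership loop with a Counter plus a first-occurrence
-- index table and a final stable sort by first index (objective: faster).

-- ===== PORT A =====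
def get_word_to_frequency_ordered_by_first_idx (words : List String) : List (String × Int) :=
  let st := (PySem.List.enumerate words 0).foldl
    (fun (st : List String × PySem.Dict String Int) p =>
      let a := st.1
      let dic := st.2
      let (a, dic) := if a.contains p.2 then (a, dic) else (a ++ [p.2], dic.insert p.2 0)
      (a, dic.modify p.2 0 (· + 1)))
    ([], PySem.Dict.empty)
  st.2.items

-- ===== PORT B =====
def get_word_to_frequency_ordered_by_first_idx_alt (words : List String) : List (String × Int) :=
  let freq := PySem.Dict.counter words
  let first := (PySem.List.enumerate words 0).foldl
    (fun (d : PySem.Dict String Int) p => if d.contains p.2 then d else d.insert p.2 p.1)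
    PySem.Dict.empty
  PySem.List.sorted freq.items (fun kv => first.getD kv.1 0) false

-- ===== PRECONDITION & SPEC =====
def Spec_get_word_to_frequency_ordered_by_first_idx (words : List String) (out : List (String × Int)) : Prop := out = get_word_to_frequency_ordered_by_first_idx_alt words
instance (words : List String) (out : List (String × Int)) : Decidable (Spec_get_word_to_frequency_ordered_by_first_idx words out) := by unfold Spec_get_word_to_frequency_ordered_by_first_idx; infer_instance

-- ===== CLAIM (what is proved, stated in full; the proofs are below) =====
def Claim_equal_get_word_to_frequency_ordered_by_first_idx : Prop := ∀ (words : List String), Dom_get_word_to_frequency_ordered_by_first_idx words → Spec_get_word_to_frequency_ordered_by_first_idx words (get_word_to_frequency_ordered_by_first_idx words)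

-- ===== LEMMAS AND PROOFS =====

-- A's loop, once the seen-list `a` mirrors the dict's key set, is the plain Counter loop.
lemma foldA_eq_modify (l : List (Int × String)) :
    ∀ (a : List String) (d : PySem.Dict String Int),
    (∀ w, a.contains w = d.contains w) →
    (l.foldl (fun (st : List String × PySem.Dict String Int) p =>
      let a := st.1
      let dic := st.2
      let (a, dic) := if a.contains p.2 then (a, dic) else (a ++ [p.2], dic.insert p.2 0)
      (a, dic.modify p.2 0 (· + 1))) (a, d)).2
    = l.foldl (fun d (p : Int × String) => d.modify p.2 0 (· + 1)) d := by
  induction l with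
  | nil => intro a d h; rfl
  | cons p l ih =>
    intro a d h
    simp only [List.foldl_cons]
    by_cases hc : d.contains p.2 = true
    · rw [show (if a.contains p.2 then (a, d) else (a ++ [p.2], d.insert p.2 0)) = (a, d) by
        rw [(h p.2).trans hc]; simp]
      exact ih a _ (by
        intro w
        rw [h w, PySem.Dict.contains_modify]
        cases hw : (w == p.2) with
        | true => simp [eq_of_beq hw, hc]
        | false => simp)
    · have hc' : d.contains p.2 = false := by simpa using hc
      rw [show (if a.contains p.2 then (a, d) else (a ++ [p.2], d.insert p.2 0))
            = (a ++ [p.2], d.insert p.2 0) by rw [(h p.2).trans hc']; simp]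
      have hins : (d.insert p.2 0).modify p.2 0 (· + 1) = d.modify p.2 0 (· + 1) := by
        simp [PySem.Dict.modify, PySem.Dict.getD_insert_self,
          PySem.Dict.insert_insert_self, PySem.Dict.getD_of_not_contains d (0 : Int) hc']
      rw [hins]
      exact ih _ _ (by
        intro w
        show (a ++ [p.2]).contains w = (d.modify p.2 0 (· + 1)).contains w
        rw [PySem.Dict.contains_modify]
        cases hw : (w == p.2) with
        | true => simp [eq_of_beq hw]
        | false =>
          have hne : w ≠ p.2 := by intro e; rw [e] at hw; simp at hw
          rw [← h w]
          simp [hne])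

-- A's dict is Counter(words).
lemma dictA_eq_counter (words : List String) :
    (PySem.List.enumerate words 0).foldl (fun d (p : Int × String) => d.modify p.2 0 (· + 1))
      PySem.Dict.empty = PySem.Dict.counter words := by
  rw [PySem.Dict.counter_eq_foldl]
  conv_rhs => rw [← PySem.List.map_snd_enumerate words 0]
  rw [List.foldl_map]

-- B's first-index loop: values stay strictly increasing and below the running index,
-- and its keys are the distinct words in first-occurrence order.
lemma foldFirst_invariant (l : List String) :
    ∀ (n : Int) (d : PySem.Dict String Int),
    d.values.Pairwise (· < ·) → (∀ v ∈ d.values, v < n) →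
    (((PySem.List.enumerate l n).foldl
        (fun (d : PySem.Dict String Int) p => if d.contains p.2 then d else d.insert p.2 p.1)
        d).values.Pairwise (· < ·)) ∧
    (((PySem.List.enumerate l n).foldl
        (fun (d : PySem.Dict String Int) p => if d.contains p.2 then d else d.insert p.2 p.1)
        d).keys = PySem.Set.update d.keys l) ∧
    (∀ v ∈ ((PySem.List.enumerate l n).foldl
        (fun (d : PySem.Dict String Int) p => if d.contains p.2 then d else d.insert p.2 p.1)
        d).values, v < n + l.length) := by
  induction l with
  | nil =>
    intro n d hp hb
    refine ⟨hp, rfl, ?_⟩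
    simpa using hb
  | cons w l ih =>
    intro n d hp hb
    rw [PySem.List.enumerate_cons, List.foldl_cons]
    by_cases hc : d.contains w = true
    · simp only [hc, if_true]
      have h2 : ∀ v ∈ d.values, v < n + 1 := fun v hv => lt_trans (hb v hv) (by omega)
      obtain ⟨h1', h2', h3'⟩ := ih (n + 1) d hp h2
      have hkeys : PySem.Set.add d.keys w = d.keys := by
        have hm : w ∈ d.keys := by
          rw [PySem.Dict.contains_eq_decide_mem_keys] at hc
          simpa using hc
        simp [PySem.Set.add, PySem.Set.contains, hm]
      refine ⟨h1', ?_, ?_⟩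
      · rw [h2']
        simp only [PySem.Set.update, List.foldl_cons, hkeys]
      · intro v hv
        have := h3' v hv
        simp only [List.length_cons] at *
        push_cast at *
        omega
    · have hc' : d.contains w = false := by simpa using hc
      simp only [hc', Bool.false_eq_true, if_false]
      have hvals : (d.insert w n).values = d.values ++ [n] := by
        simp only [PySem.Dict.values, PySem.Dict.items_insert_of_not_contains d n hc',
          List.map_append, List.map_cons, List.map_nil]
      have hp' : (d.insert w n).values.Pairwise (· < ·) := by
        rw [hvals, List.pairwise_append]
        exact ⟨hp, by simp, by intro a ha b hb'; simp at hb'; subst hb'; exact hb a ha⟩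
      have hb' : ∀ v ∈ (d.insert w n).values, v < n + 1 := by
        intro v hv
        rw [hvals] at hv
        rcases List.mem_append.mp hv with h | h
        · exact lt_trans (hb v h) (by omega)
        · simp at h; omega
      obtain ⟨h1', h2', h3'⟩ := ih (n + 1) (d.insert w n) hp' hb'
      have hkeys : (d.insert w n).keys = PySem.Set.add d.keys w := by
        have hm : w ∉ d.keys := by
          rw [PySem.Dict.contains_eq_decide_mem_keys] at hc'
          simpa using hc'
        rw [PySem.Dict.keys_insert_of_not_contains d n hc']
        simp [PySem.Set.add, PySem.Set.contains, hm]
      refine ⟨h1', ?_, ?_⟩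
      · rw [h2', hkeys]
        simp only [PySem.Set.update, List.foldl_cons]
      · intro v hv
        have := h3' v hv
        simp only [List.length_cons] at *
        push_cast at *
        omega

-- The first-index table built from scratch: keys are the distinct words in order,
-- values strictly increasing along them.
lemma first_props (words : List String) :
    (((PySem.List.enumerate words 0).foldl
        (fun (d : PySem.Dict String Int) p => if d.contains p.2 then d else d.insert p.2 p.1)
        PySem.Dict.empty).keys = PySem.Set.ofList words) ∧
    (((PySem.List.enumerate words 0).foldl
        (fun (d : PySem.Dict String Int) p => if d.contains p.2 then d else d.insert p.2 p.1)
        PySem.Dict.empty).values.Pairwise (· < ·)) := by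
  obtain ⟨h1, h2, _⟩ := foldFirst_invariant words 0 PySem.Dict.empty (by simp [PySem.Dict.values, PySem.Dict.empty]) (by simp [PySem.Dict.values, PySem.Dict.empty])
  refine ⟨?_, h1⟩
  rw [h2, PySem.Set.ofList_eq_foldl]
  simp [PySem.Set.update]

-- Counter(words).items is already sorted by first-occurrence index.
lemma counter_items_pairwise (words : List String) :
    (PySem.Dict.counter words).items.Pairwise (fun a b =>
      ((PySem.List.enumerate words 0).foldl
        (fun (d : PySem.Dict String Int) p => if d.contains p.2 then d else d.insert p.2 p.1)
        PySem.Dict.empty).getD a.1 0 <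
      ((PySem.List.enumerate words 0).foldl
        (fun (d : PySem.Dict String Int) p => if d.contains p.2 then d else d.insert p.2 p.1)
        PySem.Dict.empty).getD b.1 0) := by
  obtain ⟨hk, hv⟩ := first_props words
  rw [PySem.Dict.items_counter, List.pairwise_map]
  have hnd : (((PySem.List.enumerate words 0).foldl
      (fun (d : PySem.Dict String Int) p => if d.contains p.2 then d else d.insert p.2 p.1)
      PySem.Dict.empty)).keys.Nodup := by
    rw [hk]; exact PySem.Set.nodup_ofList words
  rw [PySem.Dict.values_eq_map_keys _ hnd 0, List.pairwise_map, hk] at hv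
  exact hv

-- ===== VERDICT (by name: the statement is the Claim_ definition above) =====
theorem get_word_to_frequency_ordered_by_first_idx_spec : Claim_equal_get_word_to_frequency_ordered_by_first_idx := by
  unfold Claim_equal_get_word_to_frequency_ordered_by_first_idx
  intro words _
  unfold Spec_get_word_to_frequency_ordered_by_first_idx
  unfold get_word_to_frequency_ordered_by_first_idx get_word_to_frequency_ordered_by_first_idx_alt
  simp only []
  rw [foldA_eq_modify (PySem.List.enumerate words 0) [] PySem.Dict.empty
      (by intro w; simp [PySem.Dict.contains_empty])]
  rw [dictA_eq_counter]
  rw [PySem.List.sorted_eq_of_perm_of_pairwise_lt _ _ _ (List.Perm.refl _)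
      (counter_items_pairwise words)]
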